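-- pv_equiv track=rewrite | github.com/amusamih/agentic-meio | scripts/run_stockpyl_serial.py | _single_prompt_version
-- ===== SOURCE A (Python) =====
-- def _single_prompt_version(values: tuple[str | None, ...]) -> str | None:
--     normalized = tuple(value for value in values if value is not None)
--     if not normalized:
--         return None
--     unique_values = sorted(set(normalized))
--     if len(unique_values) == 1:
--         return unique_values[0]
--     return "mixed"
-- ===== SOURCE B (Python) =====
-- def _single_prompt_version(values):
--     result = None
--     for value in values:
--         if value is None:
--             continue
--         if result is None:
--             result = value
--         elif value != result:
--             return "mixed"
--     return result
-- ===== Notes on version B (the rewrite author's own statement) =====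
-- stated objective: simpler
-- what changed: Replaced the filter + set construction + sort + length test with one short-circuiting pass that records the first non-None value and returns 'mixed' on the first disagreement.
import Mathlib
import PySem

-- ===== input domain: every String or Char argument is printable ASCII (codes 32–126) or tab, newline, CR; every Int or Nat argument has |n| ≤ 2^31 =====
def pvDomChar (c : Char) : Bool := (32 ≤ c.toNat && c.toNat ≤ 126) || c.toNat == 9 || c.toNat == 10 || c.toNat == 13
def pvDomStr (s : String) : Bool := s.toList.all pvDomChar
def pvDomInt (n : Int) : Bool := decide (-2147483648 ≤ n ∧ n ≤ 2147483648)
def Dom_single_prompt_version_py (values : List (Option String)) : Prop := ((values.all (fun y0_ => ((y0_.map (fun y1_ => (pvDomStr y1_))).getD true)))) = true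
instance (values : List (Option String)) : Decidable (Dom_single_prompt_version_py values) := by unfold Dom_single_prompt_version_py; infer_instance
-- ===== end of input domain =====

-- B replaces A's filter + set + sort + length test by one short-circuiting pass (simpler).

-- ===== PORT A =====
def single_prompt_version_py (values : List (Option String)) : Option String :=
  let normalized := values.filterMap id
  if normalized = [] then none
  else
    let unique_values := PySem.List.sorted (PySem.Set.ofList normalized) (fun x => x) false
    if unique_values.length = 1 then PySem.List.pyGet? unique_values 0
    else some "mixed"

-- ===== PORT B =====
-- the loop: `result` accumulator, early return "mixed" on a disagreement
def spvGo (result : Option String) : List (Option String) → Option String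
  | [] => result
  | v? :: rest =>
    match v? with
    | none => spvGo result rest
    | some v =>
      match result with
      | none => spvGo (some v) rest
      | some r => if v ≠ r then some "mixed" else spvGo (some r) rest

def single_prompt_version_py_alt (values : List (Option String)) : Option String :=
  spvGo none values

-- ===== PRECONDITION & SPEC =====
def Spec_single_prompt_version_py (values : List (Option String)) (out : Option String) : Prop := out = single_prompt_version_py_alt values
instance (values : List (Option String)) (out : Option String) : Decidable (Spec_single_prompt_version_py values out) := by unfold Spec_single_prompt_version_py; infer_instance

-- ===== CLAIM (what is proved, stated in full; the proofs are below) =====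
def Claim_equal_single_prompt_version_py : Prop := ∀ (values : List (Option String)), Dom_single_prompt_version_py values → Spec_single_prompt_version_py values (single_prompt_version_py values)

-- ===== LEMMAS AND PROOFS =====

lemma spvGo_some (values : List (Option String)) (r : String) :
    spvGo (some r) values =
      if ∀ w ∈ values.filterMap id, w = r then some r else some "mixed" := by
  induction values with
  | nil => simp [spvGo]
  | cons v? rest ih =>
    cases v? with
    | none => simpa [spvGo] using ih
    | some v =>
      by_cases hv : v = r
      · subst hv
        have hcond : (∀ w ∈ List.filterMap id (some v :: rest), w = v) ↔
            (∀ w ∈ List.filterMap id rest, w = v) := by simp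
        simp only [spvGo]
        rw [if_neg (by simp), ih, if_congr hcond rfl rfl]
      · simp [spvGo, hv]

lemma spvGo_none (values : List (Option String)) :
    spvGo none values =
      match values.filterMap id with
      | [] => none
      | v :: rest => if ∀ w ∈ rest, w = v then some v else some "mixed" := by
  induction values with
  | nil => simp [spvGo]
  | cons v? rest ih =>
    cases v? with
    | none => simpa [spvGo] using ih
    | some v =>
      simp [spvGo, spvGo_some, Function.id_def]

lemma ofList_all_eq (l : List String) (v : String) (h : ∀ w ∈ l, w = v) :
    PySem.Set.ofList (v :: l) = [v] := by
  have key : ∀ (l' : List String), (∀ w ∈ l', w = v) → l'.foldl PySem.Set.add [v] = [v] := by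
    intro l'
    induction l' with
    | nil => intro _; rfl
    | cons x xs ih =>
      intro hx
      have hxv : x = v := hx x (by simp)
      subst hxv
      have : PySem.Set.add [x] x = [x] := by
        simp [PySem.Set.add, PySem.Set.contains]
      simpa [List.foldl, this] using ih (fun w hw => hx w (by simp [hw]))
  have : PySem.Set.ofList (v :: l) = l.foldl PySem.Set.add [v] := by
    rw [PySem.Set.ofList_eq_foldl]
    rfl
  rw [this, key l h]

lemma A_all_eq (ns : List String) (v : String) (h : ∀ w ∈ ns, w = v) :
    PySem.List.sorted (PySem.Set.ofList (v :: ns)) (fun x => x) false = [v] := by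
  rw [ofList_all_eq ns v h]
  rfl

-- ===== VERDICT (by name: the statement is the Claim_ definition above) =====
theorem single_prompt_version_py_spec : Claim_equal_single_prompt_version_py := by
  intro values _
  unfold Spec_single_prompt_version_py single_prompt_version_py single_prompt_version_py_alt
  rw [spvGo_none]
  cases hns : values.filterMap id with
  | nil => simp
  | cons v rest =>
    by_cases h : ∀ w ∈ rest, w = v
    · simp [A_all_eq rest v h, PySem.List.pyGet?, PySem.List.pyIdx?]
      intro x hx hxv
      exact absurd (h x hx) hxv
    · rcases not_forall.mp h with ⟨w, hw⟩
      rcases Classical.not_imp.mp hw with ⟨hwmem, hwv⟩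
      have hlen : ¬ (PySem.Set.ofList (v :: rest)).length = 1 := by
        intro h1
        have hv : v ∈ PySem.Set.ofList (v :: rest) := by
          rw [PySem.Set.mem_ofList]; simp
        have hw' : w ∈ PySem.Set.ofList (v :: rest) := by
          rw [PySem.Set.mem_ofList]; simp [hwmem]
        match hl : PySem.Set.ofList (v :: rest), h1 with
        | [x], _ =>
          rw [hl] at hv hw'
          simp at hv hw'
          exact hwv (hw'.trans hv.symm)
      simp [h, hlen]
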